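-- pv_equiv track=rewrite | github.com/DiegoAF10/elclub | erp/audit_db.py | find_related_variants
-- ===== SOURCE A (Python) =====
-- def get_family(catalog, family_id):
--     for f in catalog:
--         if f.get("family_id") == family_id:
--             return f
--     return None
--
-- def find_related_variants(catalog, base_family_id):
--     """Busca variantes relacionadas (women/kids/baby/jacket/etc) de una family base.
--     base_family_id es adulto (sin sufijo), ej 'argentina-2026-home'.
--     Retorna dict {category: family}.
--     """
--     result = {}
--     fam_base = get_family(catalog, base_family_id)
--     if fam_base:
--         result["adult"] = fam_base
--
--     suffixes_to_cat = {
--         "-women": "women",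
--         "-kids": "kids",
--         "-baby": "baby",
--         "-jacket": "jacket",
--         "-jacket-pants": "jacket",
--         "-training": "training",
--         "-polo": "polo",
--         "-vest": "vest",
--         "-sweatshirt": "sweatshirt",
--     }
--     for suffix, cat in suffixes_to_cat.items():
--         fid = base_family_id + suffix
--         fam = get_family(catalog, fid)
--         if fam:
--             result[cat] = fam
--
--     return result
-- ===== SOURCE B (Python) =====
-- def find_related_variants(catalog, base_family_id):
--     """Busca variantes relacionadas en UNA pasada sobre el catalogo:
--     clasifica cada family por su family_id contra un mapa de targets."""
--     suffixes_to_cat = {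
--         "-women": "women",
--         "-kids": "kids",
--         "-baby": "baby",
--         "-jacket": "jacket",
--         "-jacket-pants": "jacket",
--         "-training": "training",
--         "-polo": "polo",
--         "-vest": "vest",
--         "-sweatshirt": "sweatshirt",
--     }
--     # targets: expected family_id -> suffix ('' for the adult base)
--     targets = {base_family_id: ""}
--     for suffix in suffixes_to_cat:
--         targets[base_family_id + suffix] = suffix
--     # single pass over the catalog; first entry for each target wins
--     found = {}
--     for f in catalog:
--         fid = f.get("family_id")
--         if fid in targets and targets[fid] not in found:
--             found[targets[fid]] = f
--     # assemble the result in A's fixed category order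
--     result = {}
--     fam = found.get("")
--     if fam:
--         result["adult"] = fam
--     for suffix, cat in suffixes_to_cat.items():
--         fam = found.get(suffix)
--         if fam:
--             result[cat] = fam
--     return result
-- ===== Notes on version B (the rewrite author's own statement) =====
-- stated objective: alternative
-- what changed: B inverts A's loop structure: instead of ten suffix-driven linear scans of the catalog, B makes one classification pass over the catalog, matching each entry's family_id against a precomputed target-id-to-suffix map (first match per target wins), then assembles the result in the fixed category order.
import Mathlib
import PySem

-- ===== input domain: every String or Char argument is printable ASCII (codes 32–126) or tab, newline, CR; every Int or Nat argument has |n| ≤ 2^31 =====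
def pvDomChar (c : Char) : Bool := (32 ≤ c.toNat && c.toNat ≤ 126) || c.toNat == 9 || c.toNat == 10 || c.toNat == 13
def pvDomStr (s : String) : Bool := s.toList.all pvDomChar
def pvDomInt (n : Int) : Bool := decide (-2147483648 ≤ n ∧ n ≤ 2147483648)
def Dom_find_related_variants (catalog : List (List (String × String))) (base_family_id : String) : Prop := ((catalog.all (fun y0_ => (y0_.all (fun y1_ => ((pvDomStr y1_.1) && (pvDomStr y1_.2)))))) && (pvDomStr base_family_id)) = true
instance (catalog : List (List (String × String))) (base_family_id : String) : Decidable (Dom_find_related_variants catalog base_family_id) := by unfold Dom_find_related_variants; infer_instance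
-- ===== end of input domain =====

-- B inverts A's loops: one classification pass over the catalog instead of ten suffix-driven linear scans (alternative decomposition, similar measured cost).

-- ===== PORT A =====
-- get_family: first f in catalog with f.get("family_id") == family_id (assoc-list lookup = first match), else None
def get_family (catalog : List (List (String × String))) (family_id : String) : Option (List (String × String)) :=
  match catalog with
  | [] => none
  | f :: rest =>
      if f.lookup "family_id" = some family_id then some f
      else get_family rest family_id

def pvSuffixes : List (String × String) :=
  [("-women", "women"), ("-kids", "kids"), ("-baby", "baby"), ("-jacket", "jacket"),
   ("-jacket-pants", "jacket"), ("-training", "training"), ("-polo", "polo"),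
   ("-vest", "vest"), ("-sweatshirt", "sweatshirt")]

def find_related_variants (catalog : List (List (String × String))) (base_family_id : String) : List (String × List (String × String)) :=
  let result0 : PySem.Dict String (List (String × String)) := PySem.Dict.empty
  -- if fam_base: result["adult"] = fam_base   (Python truthiness: a found dict is falsy when empty)
  let result1 :=
    match get_family catalog base_family_id with
    | some f => if f.isEmpty then result0 else result0.insert "adult" f
    | none => result0
  let result2 :=
    pvSuffixes.foldl (fun r p =>
      match get_family catalog (base_family_id ++ p.1) with
      | some f => if f.isEmpty then r else r.insert p.2 f
      | none => r) result1
  result2.items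

-- ===== PORT B =====
-- targets = {base: ""} then targets[base + suffix] = suffix for each suffix (insertion-order dict)
def pvTargets (base : String) : PySem.Dict String String :=
  pvSuffixes.foldl (fun t p => t.insert (base ++ p.1) p.1) (PySem.Dict.empty.insert base "")

-- single pass over catalog: found[targets[fid]] = f only when fid is a target and the slot is empty (first match wins)
def pvCollect (catalog : List (List (String × String))) (base : String) :
    PySem.Dict String (List (String × String)) :=
  catalog.foldl (fun fd f =>
    match f.lookup "family_id" with
    | some fid =>
        match (pvTargets base).get? fid with
        | some s => if fd.contains s then fd else fd.insert s f
        | none => fd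
    | none => fd) PySem.Dict.empty

def find_related_variants_alt (catalog : List (List (String × String))) (base_family_id : String) : List (String × List (String × String)) :=
  let found := pvCollect catalog base_family_id
  let result0 : PySem.Dict String (List (String × String)) := PySem.Dict.empty
  let result1 :=
    match found.get? "" with
    | some f => if f.isEmpty then result0 else result0.insert "adult" f
    | none => result0
  let result2 :=
    pvSuffixes.foldl (fun r p =>
      match found.get? p.1 with
      | some f => if f.isEmpty then r else r.insert p.2 f
      | none => r) result1
  result2.items

-- ===== PRECONDITION & SPEC =====
def Spec_find_related_variants (catalog : List (List (String × String))) (base_family_id : String) (out : List (String × List (String × String))) : Prop := out = find_related_variants_alt catalog base_family_id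
instance (catalog : List (List (String × String))) (base_family_id : String) (out : List (String × List (String × String))) : Decidable (Spec_find_related_variants catalog base_family_id out) := by unfold Spec_find_related_variants; infer_instance

-- ===== CLAIM (what is proved, stated in full; the proofs are below) =====
def Claim_equal_find_related_variants : Prop := ∀ (catalog : List (List (String × String))) (base_family_id : String), Dom_find_related_variants catalog base_family_id → Spec_find_related_variants catalog base_family_id (find_related_variants catalog base_family_id)

-- ===== LEMMAS AND PROOFS =====

-- the ten target suffixes ('' stands for the adult base)
def pvAllSuffixes : List String :=
  ["", "-women", "-kids", "-baby", "-jacket", "-jacket-pants", "-training", "-polo", "-vest", "-sweatshirt"]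

theorem pv_self_eq_append_iff (base t : String) : base = base ++ t ↔ t = "" := by
  constructor
  · intro h
    have h2 : base.toList = base.toList ++ t.toList := by
      simpa [String.toList_append] using congrArg String.toList h
    have h3 : t.toList = [] := List.self_eq_append_right.mp h2
    exact String.toList_inj.mp (by simp [h3])
  · intro h; simp [h]

-- what the targets dict answers, as an if-chain over the ten target ids
theorem pvTargets_get (base fid : String) : (pvTargets base).get? fid =
    if fid = base ++ "-sweatshirt" then some "-sweatshirt"
    else if fid = base ++ "-vest" then some "-vest"
    else if fid = base ++ "-polo" then some "-polo"
    else if fid = base ++ "-training" then some "-training"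
    else if fid = base ++ "-jacket-pants" then some "-jacket-pants"
    else if fid = base ++ "-jacket" then some "-jacket"
    else if fid = base ++ "-baby" then some "-baby"
    else if fid = base ++ "-kids" then some "-kids"
    else if fid = base ++ "-women" then some "-women"
    else if fid = base ++ "" then some ""
    else none := by
  simp [pvTargets, pvSuffixes, List.foldl, PySem.Dict.get?_insert, PySem.Dict.get?_empty]

theorem pvTargets_iff (base s fid : String) (hs : s ∈ pvAllSuffixes) :
    (pvTargets base).get? fid = some s ↔ fid = base ++ s := by
  constructor
  · intro h
    rw [pvTargets_get] at h
    split_ifs at h with h1 h2 h3 h4 h5 h6 h7 h8 h9 h10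
    all_goals injection h with hv
    all_goals rw [← hv]; assumption
  · intro h
    subst h
    rw [pvTargets_get]
    fin_cases hs <;>
      simp [pv_self_eq_append_iff]

-- B's single pass answers exactly A's linear scan, for every target suffix
theorem pvCollect_fold_get (base s : String) (hs : s ∈ pvAllSuffixes)
    (catalog : List (List (String × String)))
    (d : PySem.Dict String (List (String × String))) :
    (catalog.foldl (fun fd f =>
      match f.lookup "family_id" with
      | some fid =>
          match (pvTargets base).get? fid with
          | some t => if fd.contains t then fd else fd.insert t f
          | none => fd
      | none => fd) d).get? s
    = (d.get? s).or (get_family catalog (base ++ s)) := by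
  induction catalog generalizing d with
  | nil => simp [get_family]
  | cons f rest ih =>
    simp only [List.foldl_cons, get_family]
    cases hl : f.lookup "family_id" with
    | none =>
      rw [if_neg (by simp), ih]
    | some fid =>
      cases ht : (pvTargets base).get? fid with
      | none =>
        have hne : fid ≠ base ++ s := by
          intro he
          rw [(pvTargets_iff base s fid hs).mpr he] at ht
          exact Option.some_ne_none s ht
        rw [if_neg (by simpa using hne), ih]
        simp [ht]
      | some t =>
        by_cases hts : t = s
        · subst hts
          have heq : fid = base ++ t := (pvTargets_iff base t fid hs).mp ht
          rw [if_pos (by rw [heq]), ih]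
          by_cases hc : d.contains t
          · rcases h : d.get? t with _ | v
            · rw [PySem.Dict.get?_eq_none_iff_contains] at h
              simp [h] at hc
            · simp [ht, hc, h, Option.or]
          · have hn : d.get? t = none := by
              rw [PySem.Dict.get?_eq_none_iff_contains]; simpa using hc
            simp [ht, hc, hn, Option.or, PySem.Dict.get?_insert_self]
        · have hne : fid ≠ base ++ s := by
            intro he
            rw [(pvTargets_iff base s fid hs).mpr he] at ht
            injection ht with hv
            exact hts hv.symm
          rw [if_neg (by simpa using hne), ih]
          by_cases hc : d.contains t
          · simp [ht, hc]
          · simp [ht, hc, PySem.Dict.get?_insert_of_ne d f (fun h => hts h.symm)]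

theorem pvCollect_get (base s : String) (hs : s ∈ pvAllSuffixes)
    (catalog : List (List (String × String))) :
    (pvCollect catalog base).get? s = get_family catalog (base ++ s) := by
  unfold pvCollect
  rw [pvCollect_fold_get base s hs catalog PySem.Dict.empty]
  simp [Option.or]

-- ===== VERDICT (by name: the statement is the Claim_ definition above) =====
theorem find_related_variants_spec : Claim_equal_find_related_variants := by
  intro catalog base _
  unfold Spec_find_related_variants find_related_variants find_related_variants_alt
  have hb : (pvCollect catalog base).get? "" = get_family catalog base := by
    rw [pvCollect_get base "" (by decide) catalog]; simp
  have hs : ∀ p ∈ pvSuffixes,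
      (pvCollect catalog base).get? p.1 = get_family catalog (base ++ p.1) := by
    intro p hp
    apply pvCollect_get base p.1 _ catalog
    fin_cases hp <;> decide
  simp only [hb]
  congr 1
  apply PySem.List.foldl_congr_mem
  intro r p hp
  rw [hs p hp]
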